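-- pv_equiv track=rewrite | github.com/web-werkstatt/session-pilot | services/dead_code_signal.py | extract_dead_code_summary
-- ===== SOURCE A (Python) =====
-- def extract_dead_code_summary(issues):
--     """Zaehlt Dead-Code-Issues nach Kategorie und Typ."""
--     dead_code = [i for i in issues if i.get("category") == "dead_code" and i.get("status") != "ignored"]
--     dead_deps = [i for i in issues if i.get("category") == "dead_deps" and i.get("status") != "ignored"]
--     dead_frontend = [i for i in issues if i.get("category") == "dead_frontend" and i.get("status") != "ignored"]
--
--     unused_imports = sum(1 for i in dead_code if "Import" in i.get("title", ""))
--     orphaned_files = sum(1 for i in dead_code if "Verwaist" in i.get("title", ""))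
--     orphaned_assets = sum(1 for i in dead_frontend if i.get("level") == "warning")
--     unused_css = sum(1 for i in dead_frontend if i.get("level") == "info")
--     high_conf = sum(1 for i in dead_code + dead_deps + dead_frontend if i.get("confidence") == "high")
--
--     total = len(dead_code) + len(dead_deps) + len(dead_frontend)
--     if total == 0:
--         return None
--
--     return {
--         "total": total,
--         "unused_imports": unused_imports,
--         "orphaned_files": orphaned_files,
--         "unused_deps": len(dead_deps),
--         "orphaned_assets": orphaned_assets,
--         "unused_css_classes": unused_css,
--         "high_confidence": high_conf,
--     }
-- ===== SOURCE B (Python) =====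
-- def extract_dead_code_summary(issues):
--     """Zaehlt Dead-Code-Issues nach Kategorie und Typ (ein Durchlauf)."""
--     dc = dd = df = ui = orf = oa = uc = hc = 0
--     for i in issues:
--         if i.get("status") == "ignored":
--             continue
--         cat = i.get("category")
--         if cat == "dead_code":
--             dc += 1
--             title = i.get("title", "")
--             if "Import" in title:
--                 ui += 1
--             if "Verwaist" in title:
--                 orf += 1
--         elif cat == "dead_deps":
--             dd += 1
--         elif cat == "dead_frontend":
--             df += 1
--             lvl = i.get("level")
--             if lvl == "warning":
--                 oa += 1
--             if lvl == "info":
--                 uc += 1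
--         else:
--             continue
--         if i.get("confidence") == "high":
--             hc += 1
--     total = dc + dd + df
--     if total == 0:
--         return None
--     return {
--         "total": total,
--         "unused_imports": ui,
--         "orphaned_files": orf,
--         "unused_deps": dd,
--         "orphaned_assets": oa,
--         "unused_css_classes": uc,
--         "high_confidence": hc,
--     }
-- ===== Notes on version B (the rewrite author's own statement) =====
-- stated objective: simpler
-- what changed: Replaced three filtering comprehensions plus five separate counting scans (and a list concatenation) with a single loop over the issues maintaining eight running counters.
import Mathlib
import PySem

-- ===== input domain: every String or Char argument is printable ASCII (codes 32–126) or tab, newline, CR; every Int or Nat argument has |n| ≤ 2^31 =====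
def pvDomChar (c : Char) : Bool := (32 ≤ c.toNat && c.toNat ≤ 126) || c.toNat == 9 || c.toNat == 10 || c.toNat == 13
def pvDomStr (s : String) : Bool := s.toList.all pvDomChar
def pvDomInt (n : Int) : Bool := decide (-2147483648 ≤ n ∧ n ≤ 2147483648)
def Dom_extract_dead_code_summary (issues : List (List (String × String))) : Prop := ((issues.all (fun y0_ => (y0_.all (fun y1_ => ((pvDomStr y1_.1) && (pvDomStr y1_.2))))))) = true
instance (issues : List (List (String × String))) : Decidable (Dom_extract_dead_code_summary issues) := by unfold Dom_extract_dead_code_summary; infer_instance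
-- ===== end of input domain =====

-- B replaces A's three filtering comprehensions and five counting scans with one loop
-- over the issues maintaining eight running counters (objective: simpler, one pass).


-- dict.get(k) / dict.get(k, dflt) on an insertion-ordered association list (first match; exact)
def dictGet? (d : List (String × String)) (k : String) : Option String :=
  (d.find? (fun p => p.1 == k)).map Prod.snd

def dictGetD (d : List (String × String)) (k dflt : String) : String :=
  (dictGet? d k).getD dflt

-- ===== PORT A =====
def extract_dead_code_summary (issues : List (List (String × String))) : Option (List (String × Int)) :=
  let dead_code := issues.filter (fun i => dictGet? i "category" == some "dead_code" && dictGet? i "status" != some "ignored")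
  let dead_deps := issues.filter (fun i => dictGet? i "category" == some "dead_deps" && dictGet? i "status" != some "ignored")
  let dead_frontend := issues.filter (fun i => dictGet? i "category" == some "dead_frontend" && dictGet? i "status" != some "ignored")
  let unused_imports : Int := (dead_code.countP (fun i => PySem.Str.isIn "Import" (dictGetD i "title" "")) : Nat)
  let orphaned_files : Int := (dead_code.countP (fun i => PySem.Str.isIn "Verwaist" (dictGetD i "title" "")) : Nat)
  let orphaned_assets : Int := (dead_frontend.countP (fun i => dictGet? i "level" == some "warning") : Nat)
  let unused_css : Int := (dead_frontend.countP (fun i => dictGet? i "level" == some "info") : Nat)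
  let high_conf : Int := ((dead_code ++ dead_deps ++ dead_frontend).countP (fun i => dictGet? i "confidence" == some "high") : Nat)
  let total : Int := (dead_code.length : Nat) + (dead_deps.length : Nat) + (dead_frontend.length : Nat)
  if total == 0 then none
  else some [("total", total), ("unused_imports", unused_imports), ("orphaned_files", orphaned_files),
             ("unused_deps", ((dead_deps.length : Nat) : Int)), ("orphaned_assets", orphaned_assets),
             ("unused_css_classes", unused_css), ("high_confidence", high_conf)]

-- ===== PORT B =====
-- one loop step: state = (dc, dd, df, ui, orf, oa, uc, hc)
def edcStep : (Int × Int × Int × Int × Int × Int × Int × Int) → List (String × String) →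
    (Int × Int × Int × Int × Int × Int × Int × Int)
  | (dc, dd, df, ui, orf, oa, uc, hc), i =>
    if dictGet? i "status" == some "ignored" then (dc, dd, df, ui, orf, oa, uc, hc)
    else
      let cat := dictGet? i "category"
      if cat == some "dead_code" then
        let title := dictGetD i "title" ""
        let ui := if PySem.Str.isIn "Import" title then ui + 1 else ui
        let orf := if PySem.Str.isIn "Verwaist" title then orf + 1 else orf
        let hc := if dictGet? i "confidence" == some "high" then hc + 1 else hc
        (dc + 1, dd, df, ui, orf, oa, uc, hc)
      else if cat == some "dead_deps" then
        let hc := if dictGet? i "confidence" == some "high" then hc + 1 else hc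
        (dc, dd + 1, df, ui, orf, oa, uc, hc)
      else if cat == some "dead_frontend" then
        let lvl := dictGet? i "level"
        let oa := if lvl == some "warning" then oa + 1 else oa
        let uc := if lvl == some "info" then uc + 1 else uc
        let hc := if dictGet? i "confidence" == some "high" then hc + 1 else hc
        (dc, dd, df + 1, ui, orf, oa, uc, hc)
      else (dc, dd, df, ui, orf, oa, uc, hc)

def extract_dead_code_summary_alt (issues : List (List (String × String))) : Option (List (String × Int)) :=
  let s := issues.foldl edcStep (0, 0, 0, 0, 0, 0, 0, 0)
  let (dc, dd, df, ui, orf, oa, uc, hc) := s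
  let total := dc + dd + df
  if total == 0 then none
  else some [("total", total), ("unused_imports", ui), ("orphaned_files", orf),
             ("unused_deps", dd), ("orphaned_assets", oa),
             ("unused_css_classes", uc), ("high_confidence", hc)]

-- ===== PRECONDITION & SPEC =====
def Spec_extract_dead_code_summary (issues : List (List (String × String))) (out : Option (List (String × Int))) : Prop := out = extract_dead_code_summary_alt issues
instance (issues : List (List (String × String))) (out : Option (List (String × Int))) : Decidable (Spec_extract_dead_code_summary issues out) := by unfold Spec_extract_dead_code_summary; infer_instance

-- ===== CLAIM (what is proved, stated in full; the proofs are below) =====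
def Claim_equal_extract_dead_code_summary : Prop := ∀ (issues : List (List (String × String))), Dom_extract_dead_code_summary issues → Spec_extract_dead_code_summary issues (extract_dead_code_summary issues)

-- ===== LEMMAS AND PROOFS =====

-- A's three filter predicates
def pDC (i : List (String × String)) : Bool := dictGet? i "category" == some "dead_code" && dictGet? i "status" != some "ignored"
def pDD (i : List (String × String)) : Bool := dictGet? i "category" == some "dead_deps" && dictGet? i "status" != some "ignored"
def pDF (i : List (String × String)) : Bool := dictGet? i "category" == some "dead_frontend" && dictGet? i "status" != some "ignored"

def pConf (i : List (String × String)) : Bool := dictGet? i "confidence" == some "high"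

-- per-issue increments of the eight counters
def d1 (i : List (String × String)) : Int := if pDC i then 1 else 0
def d2 (i : List (String × String)) : Int := if pDD i then 1 else 0
def d3 (i : List (String × String)) : Int := if pDF i then 1 else 0
def d4 (i : List (String × String)) : Int := if pDC i && PySem.Str.isIn "Import" (dictGetD i "title" "") then 1 else 0
def d5 (i : List (String × String)) : Int := if pDC i && PySem.Str.isIn "Verwaist" (dictGetD i "title" "") then 1 else 0
def d6 (i : List (String × String)) : Int := if pDF i && dictGet? i "level" == some "warning" then 1 else 0
def d7 (i : List (String × String)) : Int := if pDF i && dictGet? i "level" == some "info" then 1 else 0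
def d8 (i : List (String × String)) : Int :=
  (if pDC i && pConf i then 1 else 0) + (if pDD i && pConf i then 1 else 0) + (if pDF i && pConf i then 1 else 0)

lemma edcStep_eq (dc dd df ui orf oa uc hc : Int) (i : List (String × String)) :
    edcStep (dc, dd, df, ui, orf, oa, uc, hc) i =
      (dc + d1 i, dd + d2 i, df + d3 i, ui + d4 i, orf + d5 i, oa + d6 i, uc + d7 i, hc + d8 i) := by
  simp only [edcStep, pDC, pDD, pDF, pConf, d1, d2, d3, d4, d5, d6, d7, d8]
  by_cases hst : dictGet? i "status" = some "ignored"
  · simp [hst]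
  · by_cases h1 : dictGet? i "category" = some "dead_code"
    · simp only [h1]
      simp
      split_ifs <;> simp_all
    · by_cases h2 : dictGet? i "category" = some "dead_deps"
      · simp only [h2]
        simp
        split_ifs <;> simp_all
      · by_cases h3 : dictGet? i "category" = some "dead_frontend"
        · simp only [h3]
          simp
          split_ifs <;> simp_all
        · simp [hst, h1, h2, h3]

def sumD (f : List (String × String) → Int) (issues : List (List (String × String))) : Int :=
  (issues.map f).sum

lemma edcLoop_eq (issues : List (List (String × String))) :
    ∀ dc dd df ui orf oa uc hc : Int,
      issues.foldl edcStep (dc, dd, df, ui, orf, oa, uc, hc) =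
        (dc + sumD d1 issues, dd + sumD d2 issues, df + sumD d3 issues, ui + sumD d4 issues,
         orf + sumD d5 issues, oa + sumD d6 issues, uc + sumD d7 issues, hc + sumD d8 issues) := by
  induction issues with
  | nil => intro dc dd df ui orf oa uc hc; simp [sumD]
  | cons i rest ih =>
    intro dc dd df ui orf oa uc hc
    simp only [List.foldl_cons, edcStep_eq, ih, sumD, List.map_cons, List.sum_cons]
    refine Prod.ext (by ring) (Prod.ext (by ring) (Prod.ext (by ring) (Prod.ext (by ring)
      (Prod.ext (by ring) (Prod.ext (by ring) (Prod.ext (by ring) (by ring)))))))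

lemma countP_to_sumD (p q : List (String × String) → Bool) (issues : List (List (String × String))) :
    (((issues.filter q).countP p : Nat) : Int) =
      sumD (fun i => if q i && p i then 1 else 0) issues := by
  induction issues with
  | nil => simp [sumD]
  | cons i rest ih =>
    simp only [sumD, List.map_cons, List.sum_cons] at *
    by_cases hq : q i <;> by_cases hp : p i <;>
      simp [hq, hp, ih] <;> omega

lemma length_filter_to_sumD (q : List (String × String) → Bool) (issues : List (List (String × String))) :
    (((issues.filter q).length : Nat) : Int) = sumD (fun i => if q i then 1 else 0) issues := by
  have := countP_to_sumD (fun _ => true) q issues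
  simpa [List.countP_true] using this

lemma sumD_d8_split (issues : List (List (String × String))) :
    sumD (fun i => if pDC i && pConf i then 1 else 0) issues
      + sumD (fun i => if pDD i && pConf i then 1 else 0) issues
      + sumD (fun i => if pDF i && pConf i then 1 else 0) issues = sumD d8 issues := by
  induction issues with
  | nil => simp [sumD]
  | cons i rest ih =>
    simp only [sumD, List.map_cons, List.sum_cons] at ih ⊢
    rw [d8]
    split_ifs <;> omega

-- ===== VERDICT (by name: the statement is the Claim_ definition above) =====
theorem extract_dead_code_summary_spec : Claim_equal_extract_dead_code_summary := by
  intro issues _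
  show extract_dead_code_summary issues = extract_dead_code_summary_alt issues
  unfold extract_dead_code_summary extract_dead_code_summary_alt
  rw [edcLoop_eq]
  simp only [List.countP_append, Nat.cast_add,
    countP_to_sumD, length_filter_to_sumD, zero_add, ← sumD_d8_split]
  unfold d1 d2 d3 d4 d5 d6 d7 pDC pDD pDF pConf
  rfl
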